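-- pv_equiv track=rewrite | github.com/iownthegame/AdventofCode2020 | day20_2.py | process_grids
-- ===== SOURCE A (Python) =====
-- def process_grids(data):
--     tiles = {}
--     current_num = None
--     current_grid = []
--
--     for line in data:
--         if 'Tile' in line:
--             current_num = line.split(' ')[1][:-1]
--             tiles[current_num] = {}
--             continue
--
--         if not line:
--             tiles[current_num]['grid'] = current_grid
--             tiles[current_num]['edges'] = get_edges(current_grid)
--
--             current_num = None
--             current_grid = []
--             continue
--
--         current_grid.append(line)
--
--     tiles[current_num]['grid'] = current_grid
--     tiles[current_num]['edges'] = get_edges(current_grid)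
--
--     return tiles
--
-- def get_edges(grid):
--     return [get_edge(d, grid) for d in ['u', 'd', 'l', 'r']]
--
-- def get_edge(d, grid):
--     if d == 'u':
--         return grid[0]
--
--     if d == 'd':
--         return grid[-1]
--
--     if d == 'l':
--         return ''.join([row[0] for row in grid])
--
--     if d == 'r':
--         return ''.join([row[-1] for row in grid])
-- ===== SOURCE B (Python) =====
-- def process_grids(data):
--     # Two-phase pipeline: first partition the lines into blank-separated groups
--     # (the trailing group is always kept, even when empty), then build each
--     # tile's entry from its group.
--     groups = []
--     cur = []
--     for line in data:
--         if line:
--             cur.append(line)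
--         else:
--             groups.append(cur)
--             cur = []
--     groups.append(cur)
--
--     tiles = {}
--     for group in groups:
--         num = None
--         grid = []
--         for line in group:
--             if 'Tile' in line:
--                 num = line.split(' ')[1][:-1]
--                 tiles[num] = {}
--             else:
--                 grid.append(line)
--         tiles[num] = {'grid': grid, 'edges': get_edges(grid)}
--
--     return tiles
--
-- def get_edges(grid):
--     return [get_edge(d, grid) for d in ['u', 'd', 'l', 'r']]
--
-- def get_edge(d, grid):
--     if d == 'u':
--         return grid[0]
--
--     if d == 'd':
--         return grid[-1]
--
--     if d == 'l':
--         return ''.join([row[0] for row in grid])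
--
--     if d == 'r':
--         return ''.join([row[-1] for row in grid])
-- ===== Notes on version B (the rewrite author's own statement) =====
-- stated objective: alternative
-- what changed: A's single interleaved state machine (tiles/current_num/current_grid mutated across Tile-header, blank and row lines, with a duplicated flush after the loop) is replaced by a two-phase pipeline: first partition the lines into blank-separated groups (trailing group kept), then build each tile's grid and edges from its group, so the flush logic exists once per group and no cross-line state survives phase boundaries.
import Mathlib
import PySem

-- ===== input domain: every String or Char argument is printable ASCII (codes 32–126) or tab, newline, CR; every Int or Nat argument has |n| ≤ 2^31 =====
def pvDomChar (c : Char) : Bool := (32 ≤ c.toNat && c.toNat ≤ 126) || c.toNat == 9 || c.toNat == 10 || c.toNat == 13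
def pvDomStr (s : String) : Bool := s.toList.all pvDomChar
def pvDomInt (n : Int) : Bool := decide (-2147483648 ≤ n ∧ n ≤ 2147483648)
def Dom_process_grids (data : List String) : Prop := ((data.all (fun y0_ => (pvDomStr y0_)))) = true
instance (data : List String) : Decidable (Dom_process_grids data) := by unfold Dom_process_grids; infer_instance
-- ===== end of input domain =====

-- B replaces A's interleaved state machine by a two-phase pipeline (partition the lines
-- into blank-separated groups, then build each tile from its group); objective: alternative
-- decomposition, same O(n) cost.

-- Shared tile-grid helpers (A's get_edges/get_edge, reused verbatim by B's Python).
abbrev pvTiles := PySem.Dict String (PySem.Dict String (List String))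
abbrev pvSt := pvTiles × Option String × List String

-- line.split(' ')[1][:-1]; the .getD defaults cover IndexError, excluded by Pre_.
def pvTileNum (line : String) : String :=
  PySem.Str.slice ((PySem.List.pyGet? ((PySem.Str.split? line " ").getD []) 1).getD "") none (some (-1))

-- get_edge; ''.join of the one-char strings row[0] / row[-1] is ported as String.ofList of
-- those chars (exact); the .getD defaults cover IndexError on an empty grid/row (outside Pre_);
-- the last branch is Python's implicit None fall-through, unreachable for d ∈ {u,d,l,r}.
def pvGetEdge (d : String) (grid : List String) : String :=
  if d = "u" then (PySem.List.pyGet? grid 0).getD ""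
  else if d = "d" then (PySem.List.pyGet? grid (-1)).getD ""
  else if d = "l" then String.ofList (grid.map (fun row => (PySem.Str.pyGet? row 0).getD ' '))
  else if d = "r" then String.ofList (grid.map (fun row => (PySem.Str.pyGet? row (-1)).getD ' '))
  else ""

def pvGetEdges (grid : List String) : List String :=
  (["u", "d", "l", "r"]).map (fun d => pvGetEdge d grid)

-- ===== PORT A =====
-- tiles[current_num]['grid'] = grid; tiles[current_num]['edges'] = get_edges(grid).
-- Ported as a re-insert of the updated inner dict (Dict.insert overwrites in place, so this is
-- exact); current_num = None means Python raises KeyError — excluded by Pre_, port keeps tiles.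
def pvFinalizeA (tiles : pvTiles) (num : Option String) (grid : List String) : pvTiles :=
  match num with
  | none => tiles
  | some n =>
      tiles.insert n ((((tiles.get? n).getD PySem.Dict.empty).insert "grid" grid).insert
        "edges" (pvGetEdges grid))

def pvStepA (st : pvSt) (line : String) : pvSt :=
  if PySem.Str.isIn "Tile" line then
    (st.1.insert (pvTileNum line) PySem.Dict.empty, some (pvTileNum line), st.2.2)
  else if line = "" then
    (pvFinalizeA st.1 st.2.1 st.2.2, none, [])
  else
    (st.1, st.2.1, st.2.2 ++ [line])

def process_grids (data : List String) : List (String × List (String × List String)) :=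
  let st := data.foldl pvStepA (PySem.Dict.empty, none, [])
  (pvFinalizeA st.1 st.2.1 st.2.2).items.map (fun p => (p.1, p.2.items))

-- ===== PORT B =====
-- phase 1 loop body: 'if line: cur.append(line) else: groups.append(cur); cur = []'
def pvSplitStep (p : List (List String) × List String) (line : String) :
    List (List String) × List String :=
  if line ≠ "" then (p.1, p.2 ++ [line]) else (p.1 ++ [p.2], [])

-- phase 2 inner loop body over one group's lines
def pvStepInner (st : pvSt) (line : String) : pvSt :=
  if PySem.Str.isIn "Tile" line then
    (st.1.insert (pvTileNum line) PySem.Dict.empty, some (pvTileNum line), st.2.2)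
  else
    (st.1, st.2.1, st.2.2 ++ [line])

-- tiles[num] = {'grid': grid, 'edges': get_edges(grid)}; num = None is outside Pre_.
def pvFinalizeB (tiles : pvTiles) (num : Option String) (grid : List String) : pvTiles :=
  match num with
  | none => tiles
  | some n =>
      tiles.insert n ((PySem.Dict.empty.insert "grid" grid).insert "edges" (pvGetEdges grid))

def pvProcessGroup (tiles : pvTiles) (g : List String) : pvTiles :=
  let st := g.foldl pvStepInner (tiles, none, [])
  pvFinalizeB st.1 st.2.1 st.2.2

def process_grids_alt (data : List String) : List (String × List (String × List String)) :=
  let p := data.foldl pvSplitStep ([], [])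
  ((p.1 ++ [p.2]).foldl pvProcessGroup PySem.Dict.empty).items.map (fun q => (q.1, q.2.items))

-- ===== PRECONDITION & SPEC =====
-- Exactly the inputs on which Python A returns normally: every blank-separated block of the
-- input (including the trailing one) must contain a 'Tile' header line (each such line with a
-- space, so split(' ')[1] exists) and at least one non-header grid row; otherwise A raises
-- KeyError (current_num None / missing) or IndexError (empty grid in get_edge).
def Pre_process_grids (data : List String) : Prop :=
  ∀ g ∈ data.splitOn "",
    (∃ l ∈ g, PySem.Str.isIn "Tile" l = true) ∧
    (∃ l ∈ g, PySem.Str.isIn "Tile" l = false) ∧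
    (∀ l ∈ g, PySem.Str.isIn "Tile" l = true → PySem.Str.isIn " " l = true)
instance (data : List String) : Decidable (Pre_process_grids data) := by
  unfold Pre_process_grids; infer_instance

def pvWitness_process_grids : List String := ["Tile 1:", "ab", "cd"]

def Spec_process_grids (data : List String) (out : List (String × List (String × List String))) : Prop := out = process_grids_alt data
instance (data : List String) (out : List (String × List (String × List String))) : Decidable (Spec_process_grids data out) := by unfold Spec_process_grids; infer_instance

-- ===== CLAIM (what is proved, stated in full; the proofs are below) =====
def Claim_equal_process_grids : Prop := ∀ (data : List String), Dom_process_grids data → Pre_process_grids data → Spec_process_grids data (process_grids data)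

-- ===== LEMMAS AND PROOFS =====

def pvInv (st : pvSt) : Prop :=
  ∀ n, st.2.1 = some n → st.1.get? n = some PySem.Dict.empty

theorem pvInv_step (st : pvSt) (l : String) (h : pvInv st) : pvInv (pvStepInner st l) := by
  intro n hn
  unfold pvStepInner at hn ⊢
  by_cases hT : PySem.Str.isIn "Tile" l = true
  · rw [if_pos hT] at hn ⊢
    obtain rfl : pvTileNum l = n := by simpa using hn
    simp [PySem.Dict.get?_insert_self]
  · rw [if_neg hT] at hn ⊢
    exact h n hn

theorem pvFin_agree (st : pvSt) (h : pvInv st) :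
    pvFinalizeA st.1 st.2.1 st.2.2 = pvFinalizeB st.1 st.2.1 st.2.2 := by
  unfold pvFinalizeA pvFinalizeB
  cases hn : st.2.1 with
  | none => rfl
  | some n => simp [h n hn]

theorem pvStepA_eq_inner (st : pvSt) (l : String) (hl : l ≠ "") :
    pvStepA st l = pvStepInner st l := by
  simp [pvStepA, pvStepInner, hl]

theorem pvSplit_blank (p : List (List String) × List String) :
    pvSplitStep p "" = (p.1 ++ [p.2], []) := by simp [pvSplitStep]

theorem pvSplit_line (p : List (List String) × List String) (l : String) (hl : l ≠ "") :
    pvSplitStep p l = (p.1, p.2 ++ [l]) := by simp [pvSplitStep, hl]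

theorem pvSplit_prefix (data : List String) (gs : List (List String)) (cur : List String) :
    data.foldl pvSplitStep (gs, cur) =
      (gs ++ (data.foldl pvSplitStep ([], cur)).1, (data.foldl pvSplitStep ([], cur)).2) := by
  induction data generalizing gs cur with
  | nil => simp
  | cons l d ih =>
    simp only [List.foldl_cons]
    by_cases hl : l = ""
    · subst hl
      simp only [pvSplit_blank, List.nil_append]
      rw [ih (gs ++ [cur]) [], ih [cur] []]
      simp
    · simp only [pvSplit_line _ l hl]
      exact ih gs (cur ++ [l])

theorem pvMain (data : List String) (t0 : pvTiles) (cur0 : List String) (st : pvSt)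
    (H : cur0.foldl pvStepInner (t0, none, []) = st) (hinv : pvInv st) :
    pvFinalizeA (data.foldl pvStepA st).1 (data.foldl pvStepA st).2.1
        (data.foldl pvStepA st).2.2 =
      ((data.foldl pvSplitStep ([], cur0)).1 ++ [(data.foldl pvSplitStep ([], cur0)).2]).foldl
        pvProcessGroup t0 := by
  induction data generalizing t0 cur0 st with
  | nil =>
    have hP : pvProcessGroup t0 cur0 = pvFinalizeA st.1 st.2.1 st.2.2 := by
      simp only [pvProcessGroup]
      rw [H]
      exact (pvFin_agree st hinv).symm
    simp [hP]
  | cons l d ih =>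
    simp only [List.foldl_cons]
    by_cases hl : l = ""
    · subst hl
      have hP : pvProcessGroup t0 cur0 = pvFinalizeA st.1 st.2.1 st.2.2 := by
        simp only [pvProcessGroup]
        rw [H]
        exact (pvFin_agree st hinv).symm
      have hA : pvStepA st "" = (pvFinalizeA st.1 st.2.1 st.2.2, none, []) := by
        unfold pvStepA
        rw [if_neg (by decide : ¬ (PySem.Str.isIn "Tile" "" = true)), if_pos rfl]
      rw [hA, show pvSplitStep ([], cur0) "" = ([cur0], []) from pvSplit_blank _, pvSplit_prefix d [cur0] []]
      rw [ih (pvFinalizeA st.1 st.2.1 st.2.2) [] (pvFinalizeA st.1 st.2.1 st.2.2, none, []) rfl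
        (fun n h => nomatch h)]
      simp [hP]
    · rw [pvStepA_eq_inner st l hl, pvSplit_line _ l hl]
      exact ih t0 (cur0 ++ [l]) (pvStepInner st l)
        (by rw [List.foldl_append, H]; rfl) (pvInv_step st l hinv)

-- ===== VERDICT (by name: the statement is the Claim_ definition above) =====
theorem process_grids_spec : Claim_equal_process_grids := by
  intro data _ _
  show process_grids data = process_grids_alt data
  simp only [process_grids, process_grids_alt]
  rw [pvMain data PySem.Dict.empty [] (PySem.Dict.empty, none, []) rfl (fun n h => nomatch h)]
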